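-- pv_equiv track=rewrite | github.com/xiaowei-xie/pymatgen | pymatgen/analysis/reaction_network/fixed_composition.py | merge_species_dict
-- ===== SOURCE A (Python) =====
-- def merge_species_dict(species_dict1, species_dict2):
--     merge_dict = {}
--     key_merge = list(species_dict1.keys()) + list(species_dict2.keys())
--     key_set = list(set(key_merge))
--     for key in key_set:
--         if key in species_dict1.keys() and key in species_dict2.keys():
--             if species_dict1[key] + species_dict2[key] != 0:
--                 merge_dict[key] = species_dict1[key] + species_dict2[key]
--         elif key in species_dict1.keys():
--             merge_dict[key] = species_dict1[key]
--         elif key in species_dict2.keys():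
--             merge_dict[key] = species_dict2[key]
--     return merge_dict
-- ===== SOURCE B (Python) =====
-- def merge_species_dict(species_dict1, species_dict2):
--     result = dict(species_dict1)
--     for key, val in species_dict2.items():
--         if key in result:
--             total = result[key] + val
--             if total == 0:
--                 del result[key]
--             else:
--                 result[key] = total
--         else:
--             result[key] = val
--     return result
-- ===== Notes on version B (the rewrite author's own statement) =====
-- stated objective: simpler
-- what changed: Instead of deduplicating the union of both key lists into a set and branching on membership in each dict per key, B seeds the result with a copy of dict1 and makes one pass over dict2's items, summing (and deleting zero sums) on overlap and inserting otherwise.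
import Mathlib
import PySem

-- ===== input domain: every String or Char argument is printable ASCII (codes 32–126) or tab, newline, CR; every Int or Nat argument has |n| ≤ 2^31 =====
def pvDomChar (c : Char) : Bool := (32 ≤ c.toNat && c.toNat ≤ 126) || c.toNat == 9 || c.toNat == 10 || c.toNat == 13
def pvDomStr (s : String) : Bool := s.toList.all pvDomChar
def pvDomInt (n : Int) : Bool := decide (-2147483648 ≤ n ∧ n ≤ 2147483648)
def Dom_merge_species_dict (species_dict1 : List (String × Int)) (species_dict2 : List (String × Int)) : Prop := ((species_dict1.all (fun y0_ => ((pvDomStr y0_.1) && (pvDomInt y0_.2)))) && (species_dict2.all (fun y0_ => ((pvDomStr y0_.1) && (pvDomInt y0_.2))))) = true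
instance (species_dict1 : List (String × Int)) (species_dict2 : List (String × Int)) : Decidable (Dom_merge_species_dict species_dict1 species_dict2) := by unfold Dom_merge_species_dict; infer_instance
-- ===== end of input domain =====

-- B replaces A's scan over the deduplicated union of both key lists (branching on membership
-- in each dict per key) by seeding the result with a copy of dict1 and making one pass over
-- dict2's items, summing on overlap (deleting zero sums) and inserting otherwise: simpler.


-- ===== PORT A =====
-- The Python parameters are dicts; both ports convert the association lists at the boundary by
-- PySem.Dict.ofList (last value wins, key keeps first position — exactly dict(pairs)).
-- Body of A's for-loop; d1[key] / d2[key] are getD with default 0, evaluated only under the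
-- corresponding `contains` guard, so the default is never used (Python raises no KeyError here).
def pvStepA (d1 d2 : PySem.Dict String Int) (m : PySem.Dict String Int) (key : String) : PySem.Dict String Int :=
  if d1.contains key && d2.contains key then
    if d1.getD key 0 + d2.getD key 0 ≠ 0 then m.insert key (d1.getD key 0 + d2.getD key 0) else m
  else if d1.contains key then m.insert key (d1.getD key 0)
  else if d2.contains key then m.insert key (d2.getD key 0)
  else m

def merge_species_dict (species_dict1 : List (String × Int)) (species_dict2 : List (String × Int)) : List (String × Int) :=
  let d1 : PySem.Dict String Int := PySem.Dict.ofList species_dict1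
  let d2 : PySem.Dict String Int := PySem.Dict.ofList species_dict2
  let key_merge : List String := d1.keys ++ d2.keys
  -- list(set(key_merge)): Python iterates this set in hash order; the function returns a dict
  -- (compared unordered), so the result does not depend on that order — first-insertion order here
  let key_set : PySem.Set String := PySem.Set.ofList key_merge
  let merge_dict : PySem.Dict String Int := key_set.foldl (pvStepA d1 d2) PySem.Dict.empty
  merge_dict.items

-- ===== PORT B =====
-- Body of B's for-loop over species_dict2.items(); result[key] is getD with default 0,
-- evaluated only under the `contains` guard.
def pvStepB (r : PySem.Dict String Int) (kv : String × Int) : PySem.Dict String Int :=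
  if r.contains kv.1 then
    if r.getD kv.1 0 + kv.2 = 0 then r.erase kv.1 else r.insert kv.1 (r.getD kv.1 0 + kv.2)
  else r.insert kv.1 kv.2

def merge_species_dict_alt (species_dict1 : List (String × Int)) (species_dict2 : List (String × Int)) : List (String × Int) :=
  let result0 : PySem.Dict String Int := PySem.Dict.ofList species_dict1  -- result = dict(species_dict1)
  let d2 : PySem.Dict String Int := PySem.Dict.ofList species_dict2
  (d2.items.foldl pvStepB result0).items

-- ===== PRECONDITION & SPEC =====
def Spec_merge_species_dict (species_dict1 : List (String × Int)) (species_dict2 : List (String × Int)) (out : List (String × Int)) : Prop := out = merge_species_dict_alt species_dict1 species_dict2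
instance (species_dict1 : List (String × Int)) (species_dict2 : List (String × Int)) (out : List (String × Int)) : Decidable (Spec_merge_species_dict species_dict1 species_dict2 out) := by unfold Spec_merge_species_dict; infer_instance

-- ===== CLAIM (what is proved, stated in full; the proofs are below) =====
def Claim_equal_merge_species_dict : Prop := ∀ (species_dict1 : List (String × Int)) (species_dict2 : List (String × Int)), Dom_merge_species_dict species_dict1 species_dict2 → Spec_merge_species_dict species_dict1 species_dict2 (merge_species_dict species_dict1 species_dict2)

-- ===== LEMMAS AND PROOFS =====

-- the value A's loop body contributes for a key (as an Option), read off from pvStepA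
def pvPick (d1 d2 : PySem.Dict String Int) (k : String) : Option (String × Int) :=
  if d1.contains k && d2.contains k then
    (if d1.getD k 0 + d2.getD k 0 ≠ 0 then some (k, d1.getD k 0 + d2.getD k 0) else none)
  else if d1.contains k then some (k, d1.getD k 0)
  else if d2.contains k then some (k, d2.getD k 0)
  else none

-- per-entry effect of merging dict2 into an entry of dict1 (Dict form and assoc-list form)
def pvMix (d2 : PySem.Dict String Int) (p : String × Int) : Option (String × Int) :=
  match d2.get? p.1 with
  | some w => if p.2 + w = 0 then none else some (p.1, p.2 + w)
  | none => some p

def pvLook (l : List (String × Int)) (k : String) : Option Int :=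
  (l.find? (fun p => p.1 == k)).map (·.2)

def pvMixL (l : List (String × Int)) (p : String × Int) : Option (String × Int) :=
  match pvLook l p.1 with
  | some w => if p.2 + w = 0 then none else some (p.1, p.2 + w)
  | none => some p

lemma pvFoldSetAdd (ys : List String) (hys : ys.Nodup) (s : List String) :
    ys.foldl PySem.Set.add s = s ++ ys.filter (fun y => !s.contains y) := by
  induction ys generalizing s with
  | nil => simp
  | cons y t ih =>
    obtain ⟨hy, ht⟩ := List.nodup_cons.mp hys
    rw [List.foldl_cons]
    by_cases hm : y ∈ s
    · rw [show PySem.Set.add s y = s from by simp [PySem.Set.add, PySem.Set.contains, hm]]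
      rw [ih ht s, List.filter_cons]
      simp [hm]
    · rw [show PySem.Set.add s y = s ++ [y] from by simp [PySem.Set.add, PySem.Set.contains, hm]]
      rw [ih ht (s ++ [y]), List.filter_cons]
      simp only [List.contains_eq_mem, hm, decide_false, Bool.not_false, if_pos]
      rw [List.filter_congr (l := t) (q := fun z => !s.contains z) ?_]
      · simp
      · intro z hz
        have : z ≠ y := fun h => hy (h ▸ hz)
        simp [this]

lemma pvStepA_eq (d1 d2 m : PySem.Dict String Int) (k : String) :
    pvStepA d1 d2 m k = match pvPick d1 d2 k with
      | some p => m.insert p.1 p.2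
      | none => m := by
  unfold pvStepA pvPick; split_ifs <;> rfl

lemma pvPick_key (d1 d2 : PySem.Dict String Int) (k : String) (p : String × Int)
    (h : pvPick d1 d2 k = some p) : p.1 = k := by
  unfold pvPick at h
  split_ifs at h
  all_goals first
    | exact Option.noConfusion h
    | (injection h with h; exact congrArg Prod.fst h.symm)

lemma pvFoldA (d1 d2 : PySem.Dict String Int) (ks : List String) (hnd : ks.Nodup)
    (m : PySem.Dict String Int) (hfresh : ∀ k ∈ ks, m.contains k = false) :
    (ks.foldl (pvStepA d1 d2) m).items = m.items ++ ks.filterMap (pvPick d1 d2) := by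
  induction ks generalizing m with
  | nil => simp
  | cons k t ih =>
    obtain ⟨hk, ht⟩ := List.nodup_cons.mp hnd
    rw [List.foldl_cons, List.filterMap_cons, pvStepA_eq]
    cases hp : pvPick d1 d2 k with
    | none =>
      simp only
      exact ih ht m (fun x hx => hfresh x (List.mem_cons_of_mem _ hx))
    | some p =>
      obtain ⟨p1, p2⟩ := p
      have hkey : p1 = k := pvPick_key d1 d2 k _ hp
      subst hkey
      have hmc : m.contains p1 = false := hfresh p1 (List.mem_cons_self ..)
      simp only
      rw [ih ht (m.insert p1 p2) ?_, PySem.Dict.items_insert_of_not_contains _ _ hmc]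
      · simp
      · intro x hx
        rw [PySem.Dict.contains_insert]
        have : x ≠ p1 := fun h => hk (h ▸ hx)
        simp [this, hfresh x (List.mem_cons_of_mem _ hx)]

lemma pvPart1 (d1 d2 : PySem.Dict String Int) (h1 : d1.keys.Nodup) :
    d1.keys.filterMap (pvPick d1 d2) = d1.items.filterMap (pvMix d2) := by
  conv_rhs => rw [PySem.Dict.items_eq_map_keys d1 h1 0, List.filterMap_map]
  apply List.filterMap_congr
  intro k hk
  have hc1 : d1.contains k = true := (PySem.Dict.contains_iff_mem_keys d1 k).mpr hk
  unfold pvPick pvMix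
  cases h2 : d2.get? k with
  | none =>
    have hc2 : d2.contains k = false := by
      rw [PySem.Dict.contains_eq_isSome_get?, h2]; rfl
    simp [hc1, hc2, h2]
  | some w =>
    have hc2 : d2.contains k = true := by
      rw [PySem.Dict.contains_eq_isSome_get?, h2]; rfl
    have hg : d2.getD k 0 = w := PySem.Dict.getD_of_get?_eq_some d2 0 h2
    simp only [hc1, hc2, Bool.and_self, if_pos, Function.comp_apply, hg, h2]
    split_ifs with ha hb <;> first | rfl | (exfalso; omega)

lemma pvPart2 (d1 d2 : PySem.Dict String Int) (h2 : d2.keys.Nodup) :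
    (d2.keys.filter (fun k => !(d1.keys.contains k))).filterMap (pvPick d1 d2)
      = d2.items.filter (fun p => !d1.contains p.1) := by
  conv_rhs => rw [PySem.Dict.items_eq_map_keys d2 h2 0, List.filter_map]
  rw [show ((fun p : String × Int => !d1.contains p.1) ∘ fun k => (k, d2.getD k 0))
        = fun k => !(d1.keys.contains k) from ?_]
  · rw [← List.filterMap_eq_map_iff_forall_eq_some.mpr (fun x _ => rfl)]
    apply List.filterMap_congr
    intro k hk
    obtain ⟨hk2, hknot⟩ := List.mem_filter.mp hk
    have hd1 : d1.contains k = false := by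
      rw [PySem.Dict.contains_eq_decide_mem_keys]
      simpa using hknot
    have hd2 : d2.contains k = true := (PySem.Dict.contains_iff_mem_keys d2 k).mpr hk2
    simp [pvPick, hd1, hd2]
  · funext k
    simp [PySem.Dict.contains_eq_decide_mem_keys]

lemma pvMixL_key (l : List (String × Int)) (p b : String × Int) (h : pvMixL l p = some b) :
    b.1 = p.1 := by
  unfold pvMixL at h
  cases hl : pvLook l p.1 <;> rw [hl] at h
  · exact congrArg Prod.fst (Option.some.inj h).symm
  · simp only at h
    split_ifs at h
    exact (congrArg Prod.fst (Option.some.inj h)).symm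

lemma pvLook_eq_none (l : List (String × Int)) (k : String) (h : k ∉ l.map Prod.fst) :
    pvLook l k = none := by
  unfold pvLook
  rw [List.find?_eq_none.mpr]
  · rfl
  · intro p hp
    simp only [beq_iff_eq]
    exact fun he => h (he ▸ List.mem_map_of_mem hp)

lemma pvLook_append_ne (l l' : List (String × Int)) (k : String)
    (h : ∀ p ∈ l', p.1 ≠ k) :
    pvLook (l ++ l') k = pvLook l k := by
  unfold pvLook
  rw [List.find?_append, show List.find? (fun p => p.1 == k) l' = none from
    List.find?_eq_none.mpr (by intro p hp; simpa using h p hp), Option.or_none]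

lemma pvKeysSublist (l l' : List (String × Int)) :
    ((l'.filterMap (pvMixL l)).map Prod.fst).Sublist (l'.map Prod.fst) := by
  induction l' with
  | nil => simp
  | cons p t ih =>
    rw [List.filterMap_cons]
    cases hp : pvMixL l p with
    | none => simpa using ih.trans (List.sublist_cons_self _ _)
    | some b =>
      simp only [List.map_cons]
      exact (pvMixL_key l p b hp ▸ List.cons_sublist_cons.mpr ih)

lemma pvUniqVal (r : PySem.Dict String Int) (hr : r.keys.Nodup) (k : String) (v w : Int)
    (hv : (k, v) ∈ r.items) (hw : (k, w) ∈ r.items) : v = w := by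
  have h1 := PySem.Dict.getD_of_mem_items r hv hr 0
  have h2 := PySem.Dict.getD_of_mem_items r hw hr 0
  omega

lemma pvLook_append_self (l : List (String × Int)) (q : String × Int)
    (h : q.1 ∉ l.map Prod.fst) : pvLook (l ++ [q]) q.1 = some q.2 := by
  unfold pvLook
  rw [List.find?_append, show List.find? (fun p => p.1 == q.1) l = none from
    List.find?_eq_none.mpr (by
      intro p hp
      simp only [beq_iff_eq]
      exact fun he => h (he ▸ List.mem_map_of_mem hp)), Option.none_or]
  simp

lemma pvFoldB (r : PySem.Dict String Int) (hr : r.keys.Nodup)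
    (l : List (String × Int)) (hl : (l.map Prod.fst).Nodup) :
    (l.foldl pvStepB r).items
      = r.items.filterMap (pvMixL l) ++ l.filter (fun p => !r.contains p.1) := by
  induction l using List.reverseRecOn with
  | nil => simp [pvMixL, pvLook]
  | append_singleton l q ih =>
    rw [List.map_append, List.map_singleton] at hl
    have hq : q.1 ∉ l.map Prod.fst := by
      intro hm
      exact List.disjoint_of_nodup_append hl hm (List.mem_singleton_self _)
    have hlnd : (l.map Prod.fst).Nodup := (List.nodup_append.mp hl).1
    have hR := ih hlnd
    set R := l.foldl pvStepB r with hRdef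
    set P1 := r.items.filterMap (pvMixL l) with hP1
    set P2 := l.filter (fun p => !r.contains p.1) with hP2
    have hqlook : pvLook l q.1 = none := pvLook_eq_none l q.1 hq
    have hP2q : ∀ p ∈ P2, p.1 ≠ q.1 := by
      intro p hp
      exact fun he => hq (he ▸ List.mem_map_of_mem (List.mem_of_mem_filter hp))
    have hP1r : ∀ b ∈ P1, ∃ a ∈ r.items, a.1 = b.1 := by
      intro b hb
      obtain ⟨a, ha, hab⟩ := List.mem_filterMap.mp hb
      exact ⟨a, ha, (pvMixL_key l a b hab).symm⟩
    have hconRq : R.contains q.1 = r.contains q.1 := by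
      show (R.items.any (fun p => p.1 == q.1)) = (r.items.any (fun p => p.1 == q.1))
      rw [hR, List.any_append]
      have h2 : P2.any (fun p => p.1 == q.1) = false := by
        rw [List.any_eq_false]
        intro p hp; simpa using hP2q p hp
      rw [h2, Bool.or_false]
      apply Bool.eq_iff_iff.mpr
      simp only [List.any_eq_true, beq_iff_eq]
      constructor
      · rintro ⟨b, hb, hbq⟩
        obtain ⟨a, ha, hab⟩ := hP1r b hb
        exact ⟨a, ha, hab.trans hbq⟩
      · rintro ⟨a, ha, haq⟩
        refine ⟨a, List.mem_filterMap.mpr ⟨a, ha, ?_⟩, haq⟩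
        simp [pvMixL, haq, hqlook]
    have hRkeysNd : R.keys.Nodup := by
      show (R.items.map Prod.fst).Nodup
      rw [hR, List.map_append]
      refine List.Nodup.append ?_ ?_ ?_
      · exact (pvKeysSublist l r.items).nodup hr
      · exact (((List.filter_sublist (l := l) (p := fun p => !r.contains p.1))).map Prod.fst).nodup hlnd
      · intro x hx1 hx2
        obtain ⟨b, hb, hbx⟩ := List.mem_map.mp hx1
        obtain ⟨a, ha, hax⟩ := hP1r b hb
        obtain ⟨p, hp, hpx⟩ := List.mem_map.mp hx2
        have hpc : r.contains p.1 = false := by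
          have := List.of_mem_filter hp
          simpa using this
        have : r.contains x = true := by
          show (r.items.any (fun s => s.1 == x)) = true
          rw [List.any_eq_true]
          exact ⟨a, ha, by simp [hax, hbx]⟩
        rw [hpx] at hpc
        rw [this] at hpc
        simp at hpc
    have hcongrNe : ∀ a ∈ r.items, a.1 ≠ q.1 → pvMixL (l ++ [q]) a = pvMixL l a := by
      intro a _ hne
      unfold pvMixL
      rw [pvLook_append_ne l [q] a.1 (by
        intro p hp
        rw [List.mem_singleton.mp hp]
        exact fun h => hne h.symm)]
    rw [List.foldl_append, List.foldl_cons, List.foldl_nil, List.filter_append, ← hRdef]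
    by_cases hc : r.contains q.1 = true
    · have hfq : [q].filter (fun p => !r.contains p.1) = [] := by simp [hc]
      rw [hfq, List.append_nil]
      obtain ⟨a, ha, haq⟩ : ∃ a ∈ r.items, a.1 = q.1 := by
        have : (r.items.any (fun p => p.1 == q.1)) = true := hc
        simpa using this
      have hv : (q.1, a.2) ∈ r.items := by
        rw [← haq]
        exact ha
      have hmix_a : pvMixL l (q.1, a.2) = some (q.1, a.2) := by simp [pvMixL, hqlook]
      have hmem1 : (q.1, a.2) ∈ P1 := List.mem_filterMap.mpr ⟨(q.1, a.2), hv, hmix_a⟩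
      have hmemR : (q.1, a.2) ∈ R.items := by
        rw [hR]
        exact List.mem_append_left _ hmem1
      have hget : R.getD q.1 0 = a.2 := PySem.Dict.getD_of_mem_items R hmemR hRkeysNd 0
      have hP2f : P2.filter (fun p => !(p.1 == q.1)) = P2 :=
        List.filter_eq_self.mpr (fun p hp => by simpa using hP2q p hp)
      by_cases hz : a.2 + q.2 = 0
      · have hstep : pvStepB R q = R.erase q.1 := by
          simp [pvStepB, hconRq, hc, hget, hz]
        rw [hstep]
        show R.items.filter (fun p => !(p.1 == q.1)) = _
        rw [hR, List.filter_append, hP2f, hP1, List.filter_filterMap]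
        congr 1
        apply List.filterMap_congr
        intro b hb
        by_cases hbk : b.1 = q.1
        · have hbv : b.2 = a.2 := pvUniqVal r hr q.1 b.2 a.2 (by rw [← hbk]; exact hb) hv
          have hmb : pvMixL l b = some b := by simp [pvMixL, hbk, hqlook]
          rw [hmb]
          unfold pvMixL
          rw [hbk, pvLook_append_self l q hq]
          simp [Option.filter, hbk, hbv, hz]
        · rw [hcongrNe b hb hbk]
          cases hmb : pvMixL l b with
          | none => rfl
          | some c =>
            have := pvMixL_key l b c hmb
            simp [Option.filter, this, hbk]
      · have hstep : pvStepB R q = R.insert q.1 (a.2 + q.2) := by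
          simp [pvStepB, hconRq, hc, hget, hz]
        rw [hstep, PySem.Dict.items_insert_of_contains R (a.2 + q.2) (by rw [hconRq]; exact hc)]
        rw [hR, List.map_append]
        have hmapP2 : P2.map (fun p => if (p.1 == q.1) = true then (q.1, a.2 + q.2) else p) = P2 := by
          conv_rhs => rw [← List.map_id P2]
          apply List.map_congr_left
          intro p hp
          simp [hP2q p hp]
        rw [hmapP2, hP1, List.map_filterMap]
        congr 1
        apply List.filterMap_congr
        intro b hb
        by_cases hbk : b.1 = q.1
        · have hbv : b.2 = a.2 := pvUniqVal r hr q.1 b.2 a.2 (by rw [← hbk]; exact hb) hv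
          have hmb : pvMixL l b = some b := by simp [pvMixL, hbk, hqlook]
          rw [hmb]
          unfold pvMixL
          rw [hbk, pvLook_append_self l q hq]
          simp [hbk, hbv, hz]
        · rw [hcongrNe b hb hbk]
          cases hmb : pvMixL l b with
          | none => rfl
          | some c =>
            have := pvMixL_key l b c hmb
            simp [this, hbk]
    · have hcf : r.contains q.1 = false := Bool.not_eq_true _ ▸ (by simpa using hc)
      have hstep : pvStepB R q = R.insert q.1 q.2 := by
        simp [pvStepB, hconRq, hcf]
      rw [hstep, PySem.Dict.items_insert_of_not_contains R q.2 (by rw [hconRq]; exact hcf)]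
      have hfq : [q].filter (fun p => !r.contains p.1) = [q] := by simp [hcf]
      rw [hfq, hR]
      have hP1' : r.items.filterMap (pvMixL (l ++ [q])) = P1 := by
        rw [hP1]
        apply List.filterMap_congr
        intro b hb
        refine hcongrNe b hb (fun hbk => ?_)
        have : r.contains q.1 = true := by
          show (r.items.any (fun p => p.1 == q.1)) = true
          rw [List.any_eq_true]
          exact ⟨b, hb, by simp [hbk]⟩
        rw [this] at hcf
        simp at hcf
      rw [hP1', List.append_assoc]

-- ===== VERDICT (by name: the statement is the Claim_ definition above) =====
theorem merge_species_dict_spec : Claim_equal_merge_species_dict := by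
  intro s1 s2 _
  unfold Spec_merge_species_dict merge_species_dict merge_species_dict_alt
  dsimp only
  set d1 : PySem.Dict String Int := PySem.Dict.ofList s1 with hd1
  set d2 : PySem.Dict String Int := PySem.Dict.ofList s2 with hd2
  have hnd1 : d1.keys.Nodup := PySem.Dict.nodup_keys_ofList s1
  have hnd2 : d2.keys.Nodup := PySem.Dict.nodup_keys_ofList s2
  have hset : PySem.Set.ofList (d1.keys ++ d2.keys)
      = d1.keys ++ d2.keys.filter (fun y => !(d1.keys.contains y)) := by
    show (d1.keys ++ d2.keys).foldl PySem.Set.add PySem.Set.empty = _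
    rw [List.foldl_append, pvFoldSetAdd d1.keys hnd1, pvFoldSetAdd d2.keys hnd2]
    simp [PySem.Set.empty]
  rw [hset]
  have hK2f : (d2.keys.filter (fun y => !(d1.keys.contains y))).Nodup := hnd2.filter _
  have hdisj : List.Disjoint d1.keys (d2.keys.filter (fun y => !(d1.keys.contains y))) := by
    intro a ha hmem
    have := List.of_mem_filter hmem
    simp at this
    exact this ha
  have hfresh : ∀ k ∈ d1.keys ++ d2.keys.filter (fun y => !(d1.keys.contains y)),
      (PySem.Dict.empty (κ := String) (ν := Int)).contains k = false := by
    intro k _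
    exact PySem.Dict.contains_empty k
  rw [pvFoldA d1 d2 _ (List.Nodup.append hnd1 hK2f hdisj) PySem.Dict.empty hfresh]
  rw [List.filterMap_append, pvPart1 d1 d2 hnd1, pvPart2 d1 d2 hnd2]
  rw [pvFoldB d1 hnd1 d2.items hnd2]
  rw [show PySem.Dict.empty.items = ([] : List (String × Int)) from rfl, List.nil_append]
  rfl  -- pvMix d2 and pvMixL d2.items are definitionally equal
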